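-- pv_equiv track=rewrite | github.com/tmhuyy/fotovia-model | src/dataset.py | subset_indices_per_class
-- ===== SOURCE A (Python) =====
-- from collections import defaultdict
--
-- def subset_indices_per_class(indices, targets, per_class_limit):
--     grouped = defaultdict(list)
--
--     for idx in indices:
--         label = targets[idx]
--         grouped[label].append(idx)
--
--     selected_indices = []
--
--     for label in sorted(grouped.keys()):
--         class_indices = grouped[label]
--         limit = min(per_class_limit, len(class_indices))
--         selected_indices.extend(class_indices[:limit])
--
--     return selected_indices
-- ===== SOURCE B (Python) =====
-- def subset_indices_per_class(indices, targets, per_class_limit):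
--     labels = sorted({targets[i] for i in indices})
--     selected_indices = []
--     for label in labels:
--         group = [i for i in indices if targets[i] == label]
--         selected_indices.extend(group[:min(per_class_limit, len(group))])
--     return selected_indices
-- ===== Notes on version B (the rewrite author's own statement) =====
-- stated objective: simpler
-- what changed: Replaces the defaultdict grouping pass (one dict of lists built index-by-index, then iterated by sorted keys) with a direct formulation: sort the distinct labels, then select each label's indices by a per-label filter over the input list.
import Mathlib
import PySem

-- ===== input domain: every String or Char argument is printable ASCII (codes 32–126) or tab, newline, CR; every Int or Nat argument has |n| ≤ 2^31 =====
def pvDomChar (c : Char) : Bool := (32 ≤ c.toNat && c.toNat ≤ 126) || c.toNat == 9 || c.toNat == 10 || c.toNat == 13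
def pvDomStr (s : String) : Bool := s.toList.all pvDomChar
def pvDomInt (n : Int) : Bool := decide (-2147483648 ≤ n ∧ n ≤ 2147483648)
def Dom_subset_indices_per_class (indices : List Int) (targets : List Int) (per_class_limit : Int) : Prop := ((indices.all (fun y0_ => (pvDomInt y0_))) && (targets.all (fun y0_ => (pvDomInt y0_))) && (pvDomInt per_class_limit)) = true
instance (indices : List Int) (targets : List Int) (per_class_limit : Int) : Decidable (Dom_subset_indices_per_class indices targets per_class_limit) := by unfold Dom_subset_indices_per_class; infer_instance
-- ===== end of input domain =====

-- B replaces the defaultdict grouping pass by a direct formulation (sorted distinct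
-- labels, then a per-label filter of the indices); objective: simpler, not faster.

-- ===== PORT A =====
-- grouped = defaultdict(list); for idx in indices: grouped[targets[idx]].append(idx)
-- then for label in sorted(grouped.keys()): extend with grouped[label][:min(per_class_limit, len)]
def subset_indices_per_class (indices : List Int) (targets : List Int) (per_class_limit : Int) : List Int :=
  let grouped : PySem.Dict Int (List Int) :=
    indices.foldl
      (fun d idx => PySem.Dict.modify d (PySem.List.pyGetD targets idx 0) [] (fun l => l ++ [idx]))
      PySem.Dict.empty
  (PySem.List.sorted (PySem.Dict.keys grouped) (fun x => x) false).foldl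
    (fun selected label =>
      let class_indices := PySem.Dict.getD grouped label []
      let limit := min per_class_limit (class_indices.length : Int)
      selected ++ PySem.List.slice class_indices none (some limit))
    []

-- ===== PORT B =====
-- labels = sorted({targets[i] for i in indices}); per label, filter the group and slice it
def subset_indices_per_class_alt (indices : List Int) (targets : List Int) (per_class_limit : Int) : List Int :=
  let labels :=
    PySem.List.sorted
      (PySem.Set.ofList (indices.map (fun i => PySem.List.pyGetD targets i 0)))
      (fun x => x) false
  labels.foldl
    (fun selected label =>
      let group := indices.filter (fun i => PySem.List.pyGetD targets i 0 == label)
      selected ++ PySem.List.slice group none (some (min per_class_limit (group.length : Int))))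
    []

-- ===== PRECONDITION & SPEC =====
-- Pre_ excludes exactly the inputs where `targets[idx]` raises IndexError in Python A (and in B).
def Pre_subset_indices_per_class (indices : List Int) (targets : List Int) (per_class_limit : Int) : Prop :=
  ∀ idx ∈ indices, PySem.Raise.InRange targets.length idx
instance (indices : List Int) (targets : List Int) (per_class_limit : Int) : Decidable (Pre_subset_indices_per_class indices targets per_class_limit) := by unfold Pre_subset_indices_per_class; infer_instance

def pvWitness_subset_indices_per_class : List Int × List Int × Int := ([0, 1, 2, -1], [5, 3, 5, 3], 1)

def Spec_subset_indices_per_class (indices : List Int) (targets : List Int) (per_class_limit : Int) (out : List Int) : Prop := out = subset_indices_per_class_alt indices targets per_class_limit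
instance (indices : List Int) (targets : List Int) (per_class_limit : Int) (out : List Int) : Decidable (Spec_subset_indices_per_class indices targets per_class_limit out) := by unfold Spec_subset_indices_per_class; infer_instance

-- ===== CLAIM (what is proved, stated in full; the proofs are below) =====
def Claim_equal_subset_indices_per_class : Prop := ∀ (indices : List Int) (targets : List Int) (per_class_limit : Int), Dom_subset_indices_per_class indices targets per_class_limit → Pre_subset_indices_per_class indices targets per_class_limit → Spec_subset_indices_per_class indices targets per_class_limit (subset_indices_per_class indices targets per_class_limit)

-- ===== LEMMAS AND PROOFS =====

-- Characterisation of A's defaultdict after the grouping loop: its key list is the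
-- set of labels in first-occurrence order, and each entry is the filtered group.
theorem pv_grouped_spec (targets : List Int) (xs : List Int) :
    (xs.foldl
        (fun d idx => PySem.Dict.modify d (PySem.List.pyGetD targets idx 0) [] (fun l => l ++ [idx]))
        (PySem.Dict.empty : PySem.Dict Int (List Int))).keys
      = PySem.Set.ofList (xs.map (fun i => PySem.List.pyGetD targets i 0))
    ∧ ∀ l : Int,
      (xs.foldl
        (fun d idx => PySem.Dict.modify d (PySem.List.pyGetD targets idx 0) [] (fun l => l ++ [idx]))
        (PySem.Dict.empty : PySem.Dict Int (List Int))).getD l []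
      = xs.filter (fun i => PySem.List.pyGetD targets i 0 == l) := by
  induction xs using List.reverseRecOn with
  | nil => constructor <;> simp [PySem.Dict.keys_empty, PySem.Dict.getD_empty, PySem.Set.ofList]
  | append_singleton xs x ih =>
    obtain ⟨ihk, ihg⟩ := ih
    rw [List.foldl_append]
    simp only [List.foldl_cons, List.foldl_nil]
    set D := List.foldl
      (fun d idx => PySem.Dict.modify d (PySem.List.pyGetD targets idx 0) [] (fun l => l ++ [idx]))
      (PySem.Dict.empty : PySem.Dict Int (List Int)) xs with hD
    constructor
    · rw [PySem.Dict.keys_modify, List.map_append, List.map_cons, List.map_nil,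
        PySem.Set.ofList_append_singleton, PySem.Set.add_eq_ite, ← ihk]
      by_cases hc : PySem.List.pyGetD targets x 0 ∈ D.keys
      · rw [PySem.Dict.keys_insert_of_contains _ _ ((PySem.Dict.contains_iff_mem_keys _ _).mpr hc),
          if_pos hc]
      · have hcf : D.contains (PySem.List.pyGetD targets x 0) = false := by
          rw [Bool.eq_false_iff]
          exact fun h => hc ((PySem.Dict.contains_iff_mem_keys _ _).mp h)
        rw [PySem.Dict.keys_insert_of_not_contains _ _ hcf, if_neg hc]
    · intro l
      rw [PySem.Dict.getD_modify, List.filter_append]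
      by_cases hl : l = PySem.List.pyGetD targets x 0
      · simp [hl, ihg]
      · simp [hl, ihg, Ne.symm hl]

theorem subset_eq_alt (indices targets : List Int) (per_class_limit : Int) :
    subset_indices_per_class indices targets per_class_limit
      = subset_indices_per_class_alt indices targets per_class_limit := by
  obtain ⟨hk, hg⟩ := pv_grouped_spec targets indices
  unfold subset_indices_per_class subset_indices_per_class_alt
  simp only [hk]
  apply PySem.List.foldl_congr_mem
  intro acc label _
  simp only [hg]

-- ===== VERDICT (by name: the statement is the Claim_ definition above) =====
theorem subset_indices_per_class_spec : Claim_equal_subset_indices_per_class := by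
  intro indices targets pcl _ _
  unfold Spec_subset_indices_per_class
  exact subset_eq_alt indices targets pcl
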